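-- pv_equiv track=rewrite | github.com/waffle87/leetcode | length_longest_vshape_diag_seg.py | lenOfVDiagonal
-- ===== SOURCE A (Python) =====
-- def lenOfVDiagonal(grid):
--     """
--     :type grid: List[List[int]]
--     :rtype: int
--     """
--     ds = [[1, 1], [1, -1], [-1, -1], [-1, 1]]
--     nx = [2, 2, 0]
--     ans, n, m = 0, len(grid), len(grid[0])
--
--     def dp(i, j, x, d, k):
--         if not (0 <= i < n and 0 <= j < m):
--             return 0
--         if grid[i][j] != x:
--             return 0
--         res = dp(i + ds[d][0], j + ds[d][1], nx[x], d, k) + 1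
--         if k > 0:
--             d2 = (d + 1) % 4
--             res2 = dp(i + ds[d2][0], j + ds[d2][1], nx[x], d2, 0) + 1
--             res = max(res, res2)
--         return res
--
--     for i in range(n):
--         for j in range(m):
--             if grid[i][j] == 1:
--                 curr = max(dp(i, j, 1, d, 1) for d in range(4))
--                 ans = max(ans, curr)
--     return ans
-- ===== SOURCE B (Python) =====
-- def lenOfVDiagonal(grid):
--     n, m = len(grid), len(grid[0])
--     dirs = [(1, 1), (1, -1), (-1, -1), (-1, 1)]
--
--     def nxt(v):
--         return 0 if v == 2 else 2
--
--     def make_row(i, di, dj, prev):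
--         row = []
--         for j in range(m):
--             v = grid[i][j]
--             if v == 0 or v == 1 or v == 2:
--                 ni, nj = i + di, j + dj
--                 if 0 <= ni < n and 0 <= nj < m and grid[ni][nj] == nxt(v):
--                     row.append(1 + prev[nj])
--                 else:
--                     row.append(1)
--             else:
--                 row.append(0)
--         return row
--
--     # run[d][i][j]: length of the straight run along dirs[d] starting at (i,j),
--     # expecting grid[i][j] there and then the 2,0,2,... alternation (0 if grid[i][j] not in {0,1,2})
--     run = []
--     for (di, dj) in dirs:
--         prev = [0] * m
--         if di == 1:
--             rows = []
--             for i in range(n - 1, -1, -1):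
--                 prev = make_row(i, di, dj, prev)
--                 rows.append(prev)
--             rows.reverse()
--         else:
--             rows = []
--             for i in range(n):
--                 prev = make_row(i, di, dj, prev)
--                 rows.append(prev)
--         run.append(rows)
--
--     ans = 0
--     for i in range(n):
--         for j in range(m):
--             if grid[i][j] == 1:
--                 for d in range(4):
--                     di, dj = dirs[d]
--                     d2 = (d + 1) % 4
--                     di2, dj2 = dirs[d2]
--                     t, x, ci, cj, best = 0, 1, i, j, 0
--                     while 0 <= ci < n and 0 <= cj < m and grid[ci][cj] == x:
--                         t += 1
--                         ti, tj = ci + di2, cj + dj2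
--                         if 0 <= ti < n and 0 <= tj < m and grid[ti][tj] == nxt(x):
--                             best = max(best, t + run[d2][ti][tj])
--                         ci, cj, x = ci + di, cj + dj, nxt(x)
--                     ans = max(ans, t, best)
--     return ans
-- ===== Notes on version B (the rewrite author's own statement) =====
-- stated objective: alternative
-- what changed: A explores every start with a branching recursion dp(i,j,x,d,k) that re-walks a straight diagonal run for each possible turn point; B precomputes, per direction, a table of straight alternating-run lengths by a row-by-row DP and then, per start, one iterative scan that combines the run with one table lookup per turn point, removing A's inner recursive re-scan.
import Mathlib
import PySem

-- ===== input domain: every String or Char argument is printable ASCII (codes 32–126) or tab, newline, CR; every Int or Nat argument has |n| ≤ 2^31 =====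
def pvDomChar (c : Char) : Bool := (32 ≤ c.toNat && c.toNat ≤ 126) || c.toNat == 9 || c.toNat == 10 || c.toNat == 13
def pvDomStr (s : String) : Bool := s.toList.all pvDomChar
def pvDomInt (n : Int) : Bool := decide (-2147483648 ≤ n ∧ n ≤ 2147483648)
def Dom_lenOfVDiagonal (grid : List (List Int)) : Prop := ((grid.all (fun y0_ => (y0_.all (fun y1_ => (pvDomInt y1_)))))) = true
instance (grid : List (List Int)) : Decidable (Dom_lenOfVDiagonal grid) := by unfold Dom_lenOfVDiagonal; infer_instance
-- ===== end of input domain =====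

-- B replaces A's branching recursion by per-direction precomputed straight-run tables plus an
-- iterative per-start scan (alternative algorithm, same return values on Pre_).


-- ===== PORT A =====
def pvGet (grid : List (List Int)) (i j : Int) : Int :=
  PySem.List.pyGetD (PySem.List.pyGetD grid i []) j 0

def dsA : List (List Int) := [[1, 1], [1, -1], [-1, -1], [-1, 1]]

def nxA : List Int := [2, 2, 0]

def dpA (grid : List (List Int)) (n m : Int) : Nat → Int → Int → Int → Int → Int → Int
  | 0, _, _, _, _, _ => 0
  | Nat.succ f, i, j, x, d, k =>
    if 0 ≤ i ∧ i < n ∧ 0 ≤ j ∧ j < m then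
      if pvGet grid i j ≠ x then 0
      else
        let res := dpA grid n m f (i + pvGet dsA d 0) (j + pvGet dsA d 1)
                     (PySem.List.pyGetD nxA x 0) d k + 1
        if 0 < k then
          let d2 := PySem.Int.mod (d + 1) 4
          let res2 := dpA grid n m f (i + pvGet dsA d2 0) (j + pvGet dsA d2 1)
                        (PySem.List.pyGetD nxA x 0) d2 0 + 1
          max res res2
        else res
    else 0

def lenOfVDiagonal (grid : List (List Int)) : Int :=
  let n : Int := (grid.length : Int)
  let m : Int := ((PySem.List.pyGetD grid 0 []).length : Int)
  let F : Nat := 2 * grid.length + 4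
  (PySem.List.pyRange 0 n 1).foldl (fun ans i =>
    (PySem.List.pyRange 0 m 1).foldl (fun ans j =>
      if pvGet grid i j = 1 then
        let curr := (PySem.List.max?
            ((PySem.List.pyRange 0 4 1).map (fun d => dpA grid n m F i j 1 d 1))
            (fun y => y)).getD 0
        max ans curr
      else ans) ans) 0

-- ===== PORT B =====
def nxtB (v : Int) : Int := if v = 2 then 0 else 2

def mkRowB (grid : List (List Int)) (n m : Int) (i di dj : Int) (prev : List Int) : List Int :=
  (PySem.List.pyRange 0 m 1).foldl (fun row j =>
    let v := pvGet grid i j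
    row ++ [if v = 0 ∨ v = 1 ∨ v = 2 then
              if 0 ≤ i + di ∧ i + di < n ∧ 0 ≤ j + dj ∧ j + dj < m ∧
                 pvGet grid (i + di) (j + dj) = nxtB v then
                1 + PySem.List.pyGetD prev (j + dj) 0
              else 1
            else 0]) []

def goDownB (grid : List (List Int)) (n m : Int) (dj : Int) : Nat → Int → List (List Int)
  | 0, _ => []
  | Nat.succ c, i =>
    let rest := goDownB grid n m dj c (i + 1)
    mkRowB grid n m i 1 dj (rest.headD (List.replicate m.toNat 0)) :: rest

def goUpB (grid : List (List Int)) (n m : Int) (dj : Int) : Nat → Int → List Int → List (List Int)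
  | 0, _, _ => []
  | Nat.succ c, i, prev =>
    let r := mkRowB grid n m i (-1) dj prev
    r :: goUpB grid n m dj c (i + 1) r

def dirsB : List (Int × Int) := [(1, 1), (1, -1), (-1, -1), (-1, 1)]

def runB (grid : List (List Int)) (n m : Int) : List (List (List Int)) :=
  [goDownB grid n m 1 grid.length 0,
   goDownB grid n m (-1) grid.length 0,
   goUpB grid n m (-1) grid.length 0 (List.replicate m.toNat 0),
   goUpB grid n m 1 grid.length 0 (List.replicate m.toNat 0)]

def scanB (grid : List (List Int)) (n m : Int) (tbl : List (List Int)) (di dj di2 dj2 : Int) :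
    Nat → Int → Int → Int → Int → Int → Int
  | 0, _, _, _, t, best => max t best
  | Nat.succ f, ci, cj, x, t, best =>
    if 0 ≤ ci ∧ ci < n ∧ 0 ≤ cj ∧ cj < m ∧ pvGet grid ci cj = x then
      let t' := t + 1
      let best' :=
        if 0 ≤ ci + di2 ∧ ci + di2 < n ∧ 0 ≤ cj + dj2 ∧ cj + dj2 < m ∧
           pvGet grid (ci + di2) (cj + dj2) = nxtB x then
          max best (t' + PySem.List.pyGetD (PySem.List.pyGetD tbl (ci + di2) []) (cj + dj2) 0)
        else best
      scanB grid n m tbl di dj di2 dj2 f (ci + di) (cj + dj) (nxtB x) t' best'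
    else max t best

def lenOfVDiagonal_alt (grid : List (List Int)) : Int :=
  let n : Int := (grid.length : Int)
  let m : Int := ((PySem.List.pyGetD grid 0 []).length : Int)
  let run := runB grid n m
  (PySem.List.pyRange 0 n 1).foldl (fun ans i =>
    (PySem.List.pyRange 0 m 1).foldl (fun ans j =>
      if pvGet grid i j = 1 then
        (PySem.List.pyRange 0 4 1).foldl (fun ans d =>
          let dd := PySem.List.pyGetD dirsB d (0, 0)
          let d2 := PySem.Int.mod (d + 1) 4
          let dd2 := PySem.List.pyGetD dirsB d2 (0, 0)
          max ans (scanB grid n m (PySem.List.pyGetD run d2 []) dd.1 dd.2 dd2.1 dd2.2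
                     (grid.length + 1) i j 1 0 0)) ans
      else ans) ans) 0

-- the run table for direction d2 satisfies the tblSpec characterisation

-- ===== PRECONDITION & SPEC =====
-- Pre_ excludes exactly the inputs where Python A raises: the empty grid (grid[0] IndexError)
-- and grids having a row shorter than the first row (grid[i][j] IndexError in the main loop).
def Pre_lenOfVDiagonal (grid : List (List Int)) : Prop :=
  grid ≠ [] ∧ ∀ row ∈ grid, (grid.headD []).length ≤ row.length
instance (grid : List (List Int)) : Decidable (Pre_lenOfVDiagonal grid) := by
  unfold Pre_lenOfVDiagonal; infer_instance

def pvWitness_lenOfVDiagonal : List (List Int) := [[1, 2, 0], [2, 2, 0], [0, 0, 2]]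

def Spec_lenOfVDiagonal (grid : List (List Int)) (out : Int) : Prop := out = lenOfVDiagonal_alt grid
instance (grid : List (List Int)) (out : Int) : Decidable (Spec_lenOfVDiagonal grid out) := by
  unfold Spec_lenOfVDiagonal; infer_instance

-- ===== CLAIM (what is proved, stated in full; the proofs are below) =====
def Claim_equal_lenOfVDiagonal : Prop := ∀ (grid : List (List Int)), Dom_lenOfVDiagonal grid → Pre_lenOfVDiagonal grid → Spec_lenOfVDiagonal grid (lenOfVDiagonal grid)

-- ===== LEMMAS AND PROOFS =====
def remD (n d i : Int) : Nat := if d = 0 ∨ d = 1 then (n - i).toNat else (i + 1).toNat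

def needA (n d i k : Int) : Nat := remD n d i + (if 0 < k then n.toNat + 2 else 0)

def DPc (grid : List (List Int)) (n m i j x d k : Int) : Int :=
  dpA grid n m (needA n d i k) i j x d k

lemma ds00 : pvGet dsA 0 0 = 1 := by decide

lemma ds01 : pvGet dsA 0 1 = 1 := by decide

lemma ds10 : pvGet dsA 1 0 = 1 := by decide

lemma ds11 : pvGet dsA 1 1 = -1 := by decide

lemma ds20 : pvGet dsA 2 0 = -1 := by decide

lemma ds21 : pvGet dsA 2 1 = -1 := by decide

lemma ds30 : pvGet dsA 3 0 = -1 := by decide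

lemma ds31 : pvGet dsA 3 1 = 1 := by decide

lemma md0 : PySem.Int.mod (0 + 1) 4 = 1 := by decide

lemma md1 : PySem.Int.mod (1 + 1) 4 = 2 := by decide

lemma md2 : PySem.Int.mod (2 + 1) 4 = 3 := by decide

lemma md3 : PySem.Int.mod (3 + 1) 4 = 0 := by decide

-- helper: out of range when remD = 0

lemma dp_zero_of_rem (grid : List (List Int)) (n m : Int) (f : Nat) (i j x d k : Int)
    (hd : d = 0 ∨ d = 1 ∨ d = 2 ∨ d = 3) (h : remD n d i = 0) :
    dpA grid n m f i j x d k = 0 := by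
  cases f with
  | zero => simp [dpA]
  | succ f =>
    have hni : ¬ (0 ≤ i ∧ i < n) := by
      rcases hd with h' | h' | h' | h' <;> subst h' <;> simp [remD] at h <;> omega
    have : ¬ (0 ≤ i ∧ i < n ∧ 0 ≤ j ∧ j < m) := by tauto
    simp [dpA, this]

lemma dp_fuel (grid : List (List Int)) (n m : Int) :
    ∀ (f1 f2 : Nat) (i j x d k : Int), (d = 0 ∨ d = 1 ∨ d = 2 ∨ d = 3) →
    needA n d i k ≤ f1 → needA n d i k ≤ f2 →
    dpA grid n m f1 i j x d k = dpA grid n m f2 i j x d k := by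
  intro f1
  induction f1 with
  | zero =>
    intro f2 i j x d k hd h1 h2
    have hk : ¬ 0 < k := by by_contra hk; simp only [needA, if_pos hk] at h1; omega
    have hr : remD n d i = 0 := by simp only [needA, if_neg hk] at h1; omega
    rw [dp_zero_of_rem grid n m 0 i j x d k hd hr, dp_zero_of_rem grid n m f2 i j x d k hd hr]
  | succ f ih =>
    intro f2 i j x d k hd h1 h2
    cases f2 with
    | zero =>
      have hk : ¬ 0 < k := by by_contra hk; simp only [needA, if_pos hk] at h2; omega
      have hr : remD n d i = 0 := by simp only [needA, if_neg hk] at h2; omega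
      rw [dp_zero_of_rem grid n m _ i j x d k hd hr, dp_zero_of_rem grid n m 0 i j x d k hd hr]
    | succ g =>
      simp only [dpA]
      by_cases hb : 0 ≤ i ∧ i < n ∧ 0 ≤ j ∧ j < m
      · simp only [if_pos hb]
        by_cases hx : pvGet grid i j ≠ x
        · simp [hx]
        · simp only [if_neg hx]
          have hrem1 : 1 ≤ remD n d i := by
            rcases hd with h' | h' | h' | h' <;> subst h' <;> simp [remD] <;> omega
          -- straight child
          have hst : dpA grid n m f (i + pvGet dsA d 0) (j + pvGet dsA d 1)
                       (PySem.List.pyGetD nxA x 0) d k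
                   = dpA grid n m g (i + pvGet dsA d 0) (j + pvGet dsA d 1)
                       (PySem.List.pyGetD nxA x 0) d k := by
            apply ih _ _ _ _ _ _ hd
            · have : needA n d (i + pvGet dsA d 0) k + 1 ≤ needA n d i k := by
                rcases hd with h' | h' | h' | h' <;> subst h' <;>
                  norm_num [needA, remD] <;> simp only [ds00, ds01, ds10, ds11, ds20, ds21, ds30, ds31] <;> omega
              omega
            · have : needA n d (i + pvGet dsA d 0) k + 1 ≤ needA n d i k := by
                rcases hd with h' | h' | h' | h' <;> subst h' <;>
                  norm_num [needA, remD] <;> simp only [ds00, ds01, ds10, ds11, ds20, ds21, ds30, ds31] <;> omega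
              omega
          rw [hst]
          by_cases hk : 0 < k
          · simp only [if_pos hk]
            have hneed : needA n d i k = remD n d i + (n.toNat + 2) := by simp [needA, hk]
            have hd2 : PySem.Int.mod (d + 1) 4 = 0 ∨ PySem.Int.mod (d + 1) 4 = 1 ∨
                       PySem.Int.mod (d + 1) 4 = 2 ∨ PySem.Int.mod (d + 1) 4 = 3 := by
              rcases hd with h | h | h | h <;> subst h <;> simp [md0, md1, md2, md3]
            have hturn : dpA grid n m f (i + pvGet dsA (PySem.Int.mod (d + 1) 4) 0)
                           (j + pvGet dsA (PySem.Int.mod (d + 1) 4) 1)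
                           (PySem.List.pyGetD nxA x 0) (PySem.Int.mod (d + 1) 4) 0
                       = dpA grid n m g (i + pvGet dsA (PySem.Int.mod (d + 1) 4) 0)
                           (j + pvGet dsA (PySem.Int.mod (d + 1) 4) 1)
                           (PySem.List.pyGetD nxA x 0) (PySem.Int.mod (d + 1) 4) 0 := by
              have hcn : needA n (PySem.Int.mod (d + 1) 4) (i + pvGet dsA (PySem.Int.mod (d + 1) 4) 0) 0
                         ≤ n.toNat + 1 := by
                rcases hd with h | h | h | h <;> subst h <;>
                  norm_num [needA, remD] <;> simp only [md0, md1, md2, md3, ds00, ds01, ds10, ds11, ds20, ds21, ds30, ds31] <;> omega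
              apply ih _ _ _ _ _ _ hd2 <;> omega
            rw [hturn]
          · simp [hk]
      · simp [hb]

lemma dp_nonneg (grid : List (List Int)) (n m : Int) (f : Nat) (i j x d k : Int) :
    0 ≤ dpA grid n m f i j x d k := by
  induction f generalizing i j x d k with
  | zero => simp [dpA]
  | succ f ih =>
    simp only [dpA]
    split_ifs <;> try positivity
    all_goals {
      first
      | exact le_max_of_le_left (by have := ih (i + pvGet dsA d 0) (j + pvGet dsA d 1) (PySem.List.pyGetD nxA x 0) d k; omega)
      | (have := ih (i + pvGet dsA d 0) (j + pvGet dsA d 1) (PySem.List.pyGetD nxA x 0) d k; omega) }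

lemma DPc_nonneg (grid : List (List Int)) (n m i j x d k : Int) :
    0 ≤ DPc grid n m i j x d k := dp_nonneg grid n m _ i j x d k

lemma DPc_unfold (grid : List (List Int)) (n m : Int) (i j x d k : Int)
    (hd : d = 0 ∨ d = 1 ∨ d = 2 ∨ d = 3) :
    DPc grid n m i j x d k =
      if 0 ≤ i ∧ i < n ∧ 0 ≤ j ∧ j < m then
        if pvGet grid i j ≠ x then 0
        else
          let res := DPc grid n m (i + pvGet dsA d 0) (j + pvGet dsA d 1)
                       (PySem.List.pyGetD nxA x 0) d k + 1
          if 0 < k then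
            let d2 := PySem.Int.mod (d + 1) 4
            max res (DPc grid n m (i + pvGet dsA d2 0) (j + pvGet dsA d2 1)
                       (PySem.List.pyGetD nxA x 0) d2 0 + 1)
          else res
      else 0 := by
  by_cases hb : 0 ≤ i ∧ i < n ∧ 0 ≤ j ∧ j < m
  · have hrem1 : 1 ≤ remD n d i := by
      rcases hd with h' | h' | h' | h' <;> subst h' <;> simp [remD] <;> omega
    have hf : ∃ f, needA n d i k = f + 1 := by
      refine ⟨needA n d i k - 1, ?_⟩; simp only [needA]; omega
    obtain ⟨f, hf⟩ := hf
    unfold DPc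
    rw [hf]
    simp only [dpA, if_pos hb]
    by_cases hx : pvGet grid i j ≠ x
    · simp [hx]
    · simp only [if_neg hx]
      have hst : dpA grid n m f (i + pvGet dsA d 0) (j + pvGet dsA d 1)
                   (PySem.List.pyGetD nxA x 0) d k
               = DPc grid n m (i + pvGet dsA d 0) (j + pvGet dsA d 1)
                   (PySem.List.pyGetD nxA x 0) d k := by
      -- child need = parent need - 1
        have hch : needA n d (i + pvGet dsA d 0) k + 1 ≤ needA n d i k := by
          rcases hd with h' | h' | h' | h' <;> subst h' <;>
            norm_num [needA, remD] <;> simp only [ds00, ds10, ds20, ds30] <;> omega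
        exact dp_fuel grid n m f _ _ _ _ _ _ hd (by omega) le_rfl
      rw [hst]
      by_cases hk : 0 < k
      · simp only [if_pos hk]
        have hd2 : PySem.Int.mod (d + 1) 4 = 0 ∨ PySem.Int.mod (d + 1) 4 = 1 ∨
                   PySem.Int.mod (d + 1) 4 = 2 ∨ PySem.Int.mod (d + 1) 4 = 3 := by
          rcases hd with h | h | h | h <;> subst h <;> simp [md0, md1, md2, md3]
        have hcn : needA n (PySem.Int.mod (d + 1) 4) (i + pvGet dsA (PySem.Int.mod (d + 1) 4) 0) 0
                   ≤ n.toNat + 1 := by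
          rcases hd with h | h | h | h <;> subst h <;>
            norm_num [needA, remD] <;>
            simp only [md0, md1, md2, md3, ds00, ds10, ds20, ds30] <;> omega
        have hfl : needA n d i k = remD n d i + (n.toNat + 2) := by simp [needA, hk]
        have hturn : dpA grid n m f (i + pvGet dsA (PySem.Int.mod (d + 1) 4) 0)
                       (j + pvGet dsA (PySem.Int.mod (d + 1) 4) 1)
                       (PySem.List.pyGetD nxA x 0) (PySem.Int.mod (d + 1) 4) 0
                   = DPc grid n m (i + pvGet dsA (PySem.Int.mod (d + 1) 4) 0)
                       (j + pvGet dsA (PySem.Int.mod (d + 1) 4) 1)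
                       (PySem.List.pyGetD nxA x 0) (PySem.Int.mod (d + 1) 4) 0 := by
          exact dp_fuel grid n m f _ _ _ _ _ _ hd2 (by omega) le_rfl
        rw [hturn]
        rfl
      · simp only [if_neg hk]
        rfl
  · unfold DPc
    rcases hfv : needA n d i k with _ | f <;> simp [dpA, hb]

lemma nx_eq (x : Int) (hx : x = 0 ∨ x = 1 ∨ x = 2) :
    PySem.List.pyGetD nxA x 0 = nxtB x := by
  rcases hx with h | h | h <;> subst h <;> decide

lemma mkRow_get (grid : List (List Int)) (n m : Int) (i di dj : Int) (prev : List Int)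
    (j : Int) (h0 : 0 ≤ j) (h1 : j < m) :
    PySem.List.pyGetD (mkRowB grid n m i di dj prev) j 0 =
      (let v := pvGet grid i j
       if v = 0 ∨ v = 1 ∨ v = 2 then
         if 0 ≤ i + di ∧ i + di < n ∧ 0 ≤ j + dj ∧ j + dj < m ∧
            pvGet grid (i + di) (j + dj) = nxtB v then
           1 + PySem.List.pyGetD prev (j + dj) 0
         else 1
       else 0) := by
  unfold mkRowB
  rw [PySem.List.foldl_append_singleton_eq_map]
  simp only [List.nil_append]
  rw [PySem.List.pyGetD_map_pyRange_of_nonneg _ _ _ _ h0 h1]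

lemma pyGetD_cons_pos {α : Type} (a : α) (l : List α) (q : Int) (d : α) (hq : 1 ≤ q) :
    PySem.List.pyGetD (a :: l) q d = PySem.List.pyGetD l (q - 1) d := by
  obtain ⟨nq, rfl⟩ : ∃ nq : Nat, q = (nq : Int) + 1 := ⟨(q - 1).toNat, by omega⟩
  have h1 : ((nq : Int) + 1) = ((nq + 1 : Nat) : Int) := by push_cast; ring
  have h2 : ((nq : Int) + 1 - 1) = ((nq : Nat) : Int) := by push_cast; ring
  rw [h2, h1, PySem.List.pyGetD_natCast, PySem.List.pyGetD_natCast]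
  simp [List.getD]

def tblSpec (grid : List (List Int)) (n m : Int) (d r j : Int) : Int :=
  if pvGet grid r j = 0 ∨ pvGet grid r j = 1 ∨ pvGet grid r j = 2 then
    DPc grid n m r j (pvGet grid r j) d 0
  else 0

lemma goD_get (grid : List (List Int)) (n m : Int) (dj d : Int)
    (hcase : (d = 0 ∧ dj = 1) ∨ (d = 1 ∧ dj = -1)) :
    ∀ (c : Nat) (i : Int), 0 ≤ i → i + c = n →
    ∀ (r j : Int), i ≤ r → r < n → 0 ≤ j → j < m →
    PySem.List.pyGetD (PySem.List.pyGetD (goDownB grid n m dj c i) (r - i) []) j 0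
      = tblSpec grid n m d r j := by
  intro c
  induction c with
  | zero => intro i hi0 hin r j hr1 hr2 _ _; omega
  | succ c ih =>
    intro i hi0 hin r j hr1 hr2 hj0 hj1
    have hds0 : pvGet dsA d 0 = 1 := by
      rcases hcase with ⟨h1, h2⟩ | ⟨h1, h2⟩ <;> subst h1 <;> decide
    have hds1 : pvGet dsA d 1 = dj := by
      rcases hcase with ⟨h1, h2⟩ | ⟨h1, h2⟩ <;> subst h1 <;> subst h2 <;> decide
    have hd4 : d = 0 ∨ d = 1 ∨ d = 2 ∨ d = 3 := by
      rcases hcase with ⟨h1, _⟩ | ⟨h1, _⟩ <;> subst h1 <;> simp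
    by_cases hri : r = i
    · subst hri
      simp only [goDownB, sub_self, PySem.List.pyGetD_zero_cons]
      rw [mkRow_get grid n m r 1 dj _ j hj0 hj1]
      simp only [tblSpec]
      set v := pvGet grid r j with hv
      by_cases hvs : v = 0 ∨ v = 1 ∨ v = 2
      · simp only [if_pos hvs]
        rw [DPc_unfold grid n m r j v d 0 hd4]
        have hb : 0 ≤ r ∧ r < n ∧ 0 ≤ j ∧ j < m := ⟨hi0, hr2, hj0, hj1⟩
        simp only [if_pos hb, ← hv, ne_eq, not_true_eq_false, if_false, if_neg (by decide : ¬ (0:Int) < 0)]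
        rw [hds0, hds1, nx_eq v hvs]
        by_cases hok : 0 ≤ r + 1 ∧ r + 1 < n ∧ 0 ≤ j + dj ∧ j + dj < m ∧
            pvGet grid (r + 1) (j + dj) = nxtB v
        · simp only [if_pos hok]
          -- prev is the head of rest = row r+1
          have hc1 : 1 ≤ c := by omega
          have hrest : goDownB grid n m dj c (r + 1) ≠ [] := by
            obtain ⟨c', rfl⟩ : ∃ c', c = c' + 1 := ⟨c - 1, by omega⟩
            simp [goDownB]
          have hhead : (goDownB grid n m dj c (r + 1)).headD (List.replicate m.toNat 0)
              = PySem.List.pyGetD (goDownB grid n m dj c (r + 1)) ((r + 1) - (r + 1)) [] := by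
            rcases hgd : goDownB grid n m dj c (r + 1) with _ | ⟨hd', tl⟩
            · exact absurd hgd hrest
            · have hz : r + 1 - (r + 1) = (0 : Int) := by ring
              rw [hz, PySem.List.pyGetD_zero_cons]
              rfl
          rw [hhead]
          have := ih (r + 1) (by omega) (by omega) (r + 1) (j + dj) (by omega) (by omega)
            (by omega) (by omega)
          rw [this]
          simp only [tblSpec]
          have hnb : pvGet grid (r + 1) (j + dj) = nxtB v := hok.2.2.2.2
          have hnbs : pvGet grid (r + 1) (j + dj) = 0 ∨ pvGet grid (r + 1) (j + dj) = 1 ∨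
              pvGet grid (r + 1) (j + dj) = 2 := by
            rw [hnb]; rcases hvs with h | h | h <;> rw [h] <;> decide
          rw [if_pos hnbs, hnb]
          omega
        · simp only [if_neg hok]
          -- the child DPc is 0
          have hch : DPc grid n m (r + 1) (j + dj) (nxtB v) d 0 = 0 := by
            rw [DPc_unfold grid n m (r + 1) (j + dj) (nxtB v) d 0 hd4]
            by_cases hbb : 0 ≤ r + 1 ∧ r + 1 < n ∧ 0 ≤ j + dj ∧ j + dj < m
            · have : pvGet grid (r + 1) (j + dj) ≠ nxtB v := by tauto
              simp [hbb, this]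
            · simp [hbb]
          rw [hch]
          norm_num
      · simp [hvs]
    · have hr1' : i + 1 ≤ r := by omega
      simp only [goDownB]
      rw [pyGetD_cons_pos _ _ (r - i) [] (by omega)]
      have : r - i - 1 = r - (i + 1) := by ring
      rw [this]
      exact ih (i + 1) (by omega) (by omega) r j (by omega) hr2 hj0 hj1

lemma upRow_correct (grid : List (List Int)) (n m : Int) (dj d : Int)
    (hcase : (d = 2 ∧ dj = -1) ∨ (d = 3 ∧ dj = 1)) (i : Int) (prev : List Int)
    (hi0 : 0 ≤ i) (hi1 : i < n)
    (hprev : ∀ j', 0 ≤ j' → j' < m →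
      (0 ≤ i - 1 ∧ i - 1 < n ∧ (pvGet grid (i-1) j' = 0 ∨ pvGet grid (i-1) j' = 1 ∨ pvGet grid (i-1) j' = 2)) →
      PySem.List.pyGetD prev j' 0 = DPc grid n m (i-1) j' (pvGet grid (i-1) j') d 0) :
    ∀ j, 0 ≤ j → j < m →
    PySem.List.pyGetD (mkRowB grid n m i (-1) dj prev) j 0 = tblSpec grid n m d i j := by
  intro j hj0 hj1
  have hds0 : pvGet dsA d 0 = -1 := by
    rcases hcase with ⟨h1, h2⟩ | ⟨h1, h2⟩ <;> subst h1 <;> decide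
  have hds1 : pvGet dsA d 1 = dj := by
    rcases hcase with ⟨h1, h2⟩ | ⟨h1, h2⟩ <;> subst h1 <;> subst h2 <;> decide
  have hd4 : d = 0 ∨ d = 1 ∨ d = 2 ∨ d = 3 := by
    rcases hcase with ⟨h1, _⟩ | ⟨h1, _⟩ <;> subst h1 <;> simp
  rw [mkRow_get grid n m i (-1) dj _ j hj0 hj1]
  simp only [tblSpec]
  set v := pvGet grid i j with hv
  by_cases hvs : v = 0 ∨ v = 1 ∨ v = 2
  · simp only [if_pos hvs]
    rw [DPc_unfold grid n m i j v d 0 hd4]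
    have hb : 0 ≤ i ∧ i < n ∧ 0 ≤ j ∧ j < m := ⟨hi0, hi1, hj0, hj1⟩
    simp only [if_pos hb, ← hv, ne_eq, not_true_eq_false, if_false, if_neg (by decide : ¬ (0:Int) < 0)]
    rw [hds0, hds1, nx_eq v hvs]
    by_cases hok : 0 ≤ i + -1 ∧ i + -1 < n ∧ 0 ≤ j + dj ∧ j + dj < m ∧
        pvGet grid (i + -1) (j + dj) = nxtB v
    · simp only [if_pos hok]
      have hnb : pvGet grid (i + -1) (j + dj) = nxtB v := hok.2.2.2.2
      have hnbs : pvGet grid (i - 1) (j + dj) = 0 ∨ pvGet grid (i - 1) (j + dj) = 1 ∨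
          pvGet grid (i - 1) (j + dj) = 2 := by
        have : i - 1 = i + -1 := by ring
        rw [this, hnb]; rcases hvs with h | h | h <;> rw [h] <;> decide
      have hpv := hprev (j + dj) (by omega) (by omega)
        ⟨by omega, by omega, hnbs⟩
      have him : i + -1 = i - 1 := by ring
      rw [hpv, him]
      have hgv : pvGet grid (i - 1) (j + dj) = nxtB v := by rw [← him]; exact hnb
      rw [hgv]
      omega
    · simp only [if_neg hok]
      have hch : DPc grid n m (i + -1) (j + dj) (nxtB v) d 0 = 0 := by
        rw [DPc_unfold grid n m (i + -1) (j + dj) (nxtB v) d 0 hd4]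
        by_cases hbb : 0 ≤ i + -1 ∧ i + -1 < n ∧ 0 ≤ j + dj ∧ j + dj < m
        · have : pvGet grid (i + -1) (j + dj) ≠ nxtB v := by tauto
          simp [hbb, this]
        · rw [if_neg hbb]
      rw [hch]
      norm_num
  · simp [hvs]

lemma goU_get (grid : List (List Int)) (n m : Int) (dj d : Int)
    (hcase : (d = 2 ∧ dj = -1) ∨ (d = 3 ∧ dj = 1)) :
    ∀ (c : Nat) (i : Int) (prev : List Int), 0 ≤ i → i + c = n →
    (∀ j', 0 ≤ j' → j' < m →
      (0 ≤ i - 1 ∧ i - 1 < n ∧ (pvGet grid (i-1) j' = 0 ∨ pvGet grid (i-1) j' = 1 ∨ pvGet grid (i-1) j' = 2)) →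
      PySem.List.pyGetD prev j' 0 = DPc grid n m (i-1) j' (pvGet grid (i-1) j') d 0) →
    ∀ (r j : Int), i ≤ r → r < n → 0 ≤ j → j < m →
    PySem.List.pyGetD (PySem.List.pyGetD (goUpB grid n m dj c i prev) (r - i) []) j 0
      = tblSpec grid n m d r j := by
  intro c
  induction c with
  | zero => intro i prev hi0 hin hprev r j hr1 hr2 _ _; omega
  | succ c ih =>
    intro i prev hi0 hin hprev r j hr1 hr2 hj0 hj1
    by_cases hri : r = i
    · subst hri
      simp only [goUpB, sub_self, PySem.List.pyGetD_zero_cons]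
      exact upRow_correct grid n m dj d hcase r prev hi0 hr2 hprev j hj0 hj1
    · simp only [goUpB]
      rw [pyGetD_cons_pos _ _ (r - i) [] (by omega)]
      have hst : r - i - 1 = r - (i + 1) := by ring
      rw [hst]
      apply ih (i + 1) _ (by omega) (by omega) _ r j (by omega) hr2 hj0 hj1
      intro j' hj'0 hj'1 hcond
      have hs : i + 1 - 1 = i := by ring
      rw [hs] at hcond ⊢
      have := upRow_correct grid n m dj d hcase i prev (by omega) (by omega) hprev j' hj'0 hj'1
      rw [this]
      simp only [tblSpec]
      rw [if_pos hcond.2.2]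

set_option maxHeartbeats 2000000 in
lemma scan_eq (grid : List (List Int)) (n m : Int) (tbl : List (List Int))
    (d di dj di2 dj2 : Int) (hd : d = 0 ∨ d = 1 ∨ d = 2 ∨ d = 3)
    (hdi : di = pvGet dsA d 0) (hdj : dj = pvGet dsA d 1)
    (hd2i : di2 = pvGet dsA (PySem.Int.mod (d + 1) 4) 0)
    (hd2j : dj2 = pvGet dsA (PySem.Int.mod (d + 1) 4) 1)
    (htbl : ∀ r j, 0 ≤ r → r < n → 0 ≤ j → j < m →
      PySem.List.pyGetD (PySem.List.pyGetD tbl r []) j 0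
        = tblSpec grid n m (PySem.Int.mod (d + 1) 4) r j) :
    ∀ (f : Nat) (ci cj x t best : Int), (x = 0 ∨ x = 1 ∨ x = 2) → remD n d ci ≤ f →
    scanB grid n m tbl di dj di2 dj2 f ci cj x t best
      = max best (t + DPc grid n m ci cj x d 1) := by
  intro f
  induction f with
  | zero =>
    intro ci cj x t best hx hr
    have hni : ¬ (0 ≤ ci ∧ ci < n) := by
      rcases hd with h' | h' | h' | h' <;> subst h' <;> simp [remD] at hr <;> omega
    have hz : DPc grid n m ci cj x d 1 = 0 := by
      rw [DPc_unfold grid n m ci cj x d 1 hd]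
      have : ¬ (0 ≤ ci ∧ ci < n ∧ 0 ≤ cj ∧ cj < m) := by tauto
      rw [if_neg this]
    rw [hz]
    simp only [scanB, max_def]
    split_ifs <;> omega
  | succ f ih =>
    intro ci cj x t best hx hr
    simp only [scanB]
    by_cases hg : 0 ≤ ci ∧ ci < n ∧ 0 ≤ cj ∧ cj < m ∧ pvGet grid ci cj = x
    · simp only [if_pos hg]
      have hrem' : remD n d (ci + di) ≤ f := by
        rcases hd with h' | h' | h' | h' <;> subst h' <;> rw [hdi] <;>
          simp only [ds00, ds10, ds20, ds30] <;> simp [remD] at hr ⊢ <;> omega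
      have hx' : nxtB x = 0 ∨ nxtB x = 1 ∨ nxtB x = 2 := by
        rcases hx with h | h | h <;> rw [h] <;> decide
      rw [ih (ci + di) (cj + dj) (nxtB x) _ _ hx' hrem']
      -- unfold DPc once on the right
      rw [DPc_unfold grid n m ci cj x d 1 hd]
      have hb : 0 ≤ ci ∧ ci < n ∧ 0 ≤ cj ∧ cj < m := ⟨hg.1, hg.2.1, hg.2.2.1, hg.2.2.2.1⟩
      simp only [if_pos hb, hg.2.2.2.2, ne_eq, not_true_eq_false, if_false,
        if_pos (by decide : (0:Int) < 1)]
      rw [nx_eq x hx, ← hdi, ← hdj, ← hd2i, ← hd2j]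
      set Dn := DPc grid n m (ci + di) (cj + dj) (nxtB x) d 1 with hDn
      set Tv := DPc grid n m (ci + di2) (cj + dj2) (nxtB x) (PySem.Int.mod (d + 1) 4) 0 with hTv
      have hDn0 : 0 ≤ Dn := DPc_nonneg _ _ _ _ _ _ _ _
      have hTv0 : 0 ≤ Tv := DPc_nonneg _ _ _ _ _ _ _ _
      by_cases hok : 0 ≤ ci + di2 ∧ ci + di2 < n ∧ 0 ≤ cj + dj2 ∧ cj + dj2 < m ∧
          pvGet grid (ci + di2) (cj + dj2) = nxtB x
      · simp only [if_pos hok]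
        have hlk : PySem.List.pyGetD (PySem.List.pyGetD tbl (ci + di2) []) (cj + dj2) 0 = Tv := by
          rw [htbl (ci + di2) (cj + dj2) hok.1 hok.2.1 hok.2.2.1 hok.2.2.2.1]
          simp only [tblSpec]
          have hs : pvGet grid (ci + di2) (cj + dj2) = 0 ∨ pvGet grid (ci + di2) (cj + dj2) = 1 ∨
              pvGet grid (ci + di2) (cj + dj2) = 2 := by
            rw [hok.2.2.2.2]; exact hx'
          rw [if_pos hs, hok.2.2.2.2, hTv]
        rw [hlk]
        simp only [max_def]
        split_ifs <;> omega
      · simp only [if_neg hok]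
        have hTz : Tv = 0 := by
          rw [hTv, DPc_unfold grid n m (ci + di2) (cj + dj2) (nxtB x) (PySem.Int.mod (d + 1) 4) 0
            (by rcases hd with h | h | h | h <;> subst h <;> simp [md0, md1, md2, md3])]
          by_cases hbb : 0 ≤ ci + di2 ∧ ci + di2 < n ∧ 0 ≤ cj + dj2 ∧ cj + dj2 < m
          · have : pvGet grid (ci + di2) (cj + dj2) ≠ nxtB x := by tauto
            simp [hbb, this]
          · rw [if_neg hbb]
        rw [hTz]
        simp only [max_def]
        split_ifs <;> omega
    · simp only [if_neg hg]
      have hz : DPc grid n m ci cj x d 1 = 0 := by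
        rw [DPc_unfold grid n m ci cj x d 1 hd]
        by_cases hbb : 0 ≤ ci ∧ ci < n ∧ 0 ≤ cj ∧ cj < m
        · have : pvGet grid ci cj ≠ x := by tauto
          simp [hbb, this]
        · rw [if_neg hbb]
      rw [hz]
      simp only [max_def]
      split_ifs <;> omega

lemma run_get (grid : List (List Int)) (n m : Int) (hn : n = (grid.length : Int))
    (d2 : Int) (hd2 : d2 = 0 ∨ d2 = 1 ∨ d2 = 2 ∨ d2 = 3) :
    ∀ r j, 0 ≤ r → r < n → 0 ≤ j → j < m →
    PySem.List.pyGetD (PySem.List.pyGetD (PySem.List.pyGetD (runB grid n m) d2 []) r []) j 0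
      = tblSpec grid n m d2 r j := by
  intro r j hr0 hr1 hj0 hj1
  have hrr : r - 0 = r := by ring
  have hvac : ∀ j', 0 ≤ j' → j' < m →
      (0 ≤ (0:Int) - 1 ∧ (0:Int) - 1 < n ∧ (pvGet grid ((0:Int)-1) j' = 0 ∨ pvGet grid ((0:Int)-1) j' = 1 ∨ pvGet grid ((0:Int)-1) j' = 2)) →
      PySem.List.pyGetD (List.replicate m.toNat 0) j' 0
        = DPc grid n m ((0:Int)-1) j' (pvGet grid ((0:Int)-1) j') d2 0 := by
    intro j' _ _ hcond; omega
  rcases hd2 with h | h | h | h <;> subst h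
  · have he : PySem.List.pyGetD (runB grid n m) (0:Int) [] = goDownB grid n m 1 grid.length 0 := by
      rfl
    rw [he]
    have hres := goD_get grid n m 1 0 (by norm_num) grid.length 0 le_rfl (by omega) r j (by omega) hr1 hj0 hj1
    rw [hrr] at hres; exact hres
  · have he : PySem.List.pyGetD (runB grid n m) (1:Int) [] = goDownB grid n m (-1) grid.length 0 := by
      rfl
    rw [he]
    have hres := goD_get grid n m (-1) 1 (by norm_num) grid.length 0 le_rfl (by omega) r j (by omega) hr1 hj0 hj1
    rw [hrr] at hres; exact hres
  · have he : PySem.List.pyGetD (runB grid n m) (2:Int) []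
        = goUpB grid n m (-1) grid.length 0 (List.replicate m.toNat 0) := by rfl
    rw [he]
    have hres := goU_get grid n m (-1) 2 (by norm_num) grid.length 0 _ le_rfl (by omega) hvac r j (by omega) hr1 hj0 hj1
    rw [hrr] at hres; exact hres
  · have he : PySem.List.pyGetD (runB grid n m) (3:Int) []
        = goUpB grid n m 1 grid.length 0 (List.replicate m.toNat 0) := by rfl
    rw [he]
    have hres := goU_get grid n m 1 3 (by norm_num) grid.length 0 _ le_rfl (by omega) hvac r j (by omega) hr1 hj0 hj1
    rw [hrr] at hres; exact hres

lemma main_eq (grid : List (List Int)) : lenOfVDiagonal grid = lenOfVDiagonal_alt grid := by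
  unfold lenOfVDiagonal lenOfVDiagonal_alt
  simp only []
  set n : Int := (grid.length : Int) with hn
  set m : Int := ((PySem.List.pyGetD grid 0 []).length : Int) with hm
  apply PySem.List.foldl_congr_mem
  intro ans i hi
  have hi' := (PySem.List.mem_pyRange_one).1 hi
  apply PySem.List.foldl_congr_mem
  intro ans j hj
  have hj' := (PySem.List.mem_pyRange_one).1 hj
  by_cases h1 : pvGet grid i j = 1
  · simp only [if_pos h1]
    -- per-direction values agree
    have hdp : ∀ d : Int, (d = 0 ∨ d = 1 ∨ d = 2 ∨ d = 3) →
        dpA grid n m (2 * grid.length + 4) i j 1 d 1 = DPc grid n m i j 1 d 1 := by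
      intro d hd
      apply dp_fuel grid n m _ _ i j 1 d 1 hd _ le_rfl
      rcases hd with h | h | h | h <;> subst h <;> simp [needA, remD, hn] <;> omega
    have hscan : ∀ d : Int, (d = 0 ∨ d = 1 ∨ d = 2 ∨ d = 3) →
        (scanB grid n m (PySem.List.pyGetD (runB grid n m) (PySem.Int.mod (d + 1) 4) [])
          (PySem.List.pyGetD dirsB d (0, 0)).1 (PySem.List.pyGetD dirsB d (0, 0)).2
          (PySem.List.pyGetD dirsB (PySem.Int.mod (d + 1) 4) (0, 0)).1
          (PySem.List.pyGetD dirsB (PySem.Int.mod (d + 1) 4) (0, 0)).2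
          (grid.length + 1) i j 1 0 0)
        = DPc grid n m i j 1 d 1 := by
      intro d hd
      have hd2 : PySem.Int.mod (d + 1) 4 = 0 ∨ PySem.Int.mod (d + 1) 4 = 1 ∨
          PySem.Int.mod (d + 1) 4 = 2 ∨ PySem.Int.mod (d + 1) 4 = 3 := by
        rcases hd with h | h | h | h <;> subst h <;> simp [md0, md1, md2, md3]
      have hs := scan_eq grid n m (PySem.List.pyGetD (runB grid n m) (PySem.Int.mod (d + 1) 4) [])
        d (PySem.List.pyGetD dirsB d (0, 0)).1 (PySem.List.pyGetD dirsB d (0, 0)).2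
        (PySem.List.pyGetD dirsB (PySem.Int.mod (d + 1) 4) (0, 0)).1
        (PySem.List.pyGetD dirsB (PySem.Int.mod (d + 1) 4) (0, 0)).2
        hd ?_ ?_ ?_ ?_ (run_get grid n m hn _ hd2)
        (grid.length + 1) i j 1 0 0 (by norm_num) ?_
      · rw [hs]
        have := DPc_nonneg grid n m i j 1 d 1
        simp only [max_def]
        split_ifs <;> omega
      · rcases hd with h | h | h | h <;> subst h <;> decide
      · rcases hd with h | h | h | h <;> subst h <;> decide
      · rcases hd with h | h | h | h <;> subst h <;>
          simp only [md0, md1, md2, md3] <;> decide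
      · rcases hd with h | h | h | h <;> subst h <;>
          simp only [md0, md1, md2, md3] <;> decide
      · rcases hd with h | h | h | h <;> subst h <;> simp [remD, hn] <;> omega
    have hr4 : PySem.List.pyRange 0 4 1 = [0, 1, 2, 3] := by decide
    rw [hr4]
    simp only [List.map_cons, List.map_nil, List.foldl_cons, List.foldl_nil]
    rw [PySem.List.max?_id_cons]
    simp only [Option.getD_some, List.foldl_cons, List.foldl_nil]
    rw [hdp 0 (by norm_num), hdp 1 (by norm_num), hdp 2 (by norm_num), hdp 3 (by norm_num),
       hscan 0 (by norm_num), hscan 1 (by norm_num), hscan 2 (by norm_num), hscan 3 (by norm_num)]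
    simp only [max_def]
    split_ifs <;> omega
  · simp only [if_neg h1]

-- ===== VERDICT (by name: the statement is the Claim_ definition above) =====
theorem lenOfVDiagonal_spec : Claim_equal_lenOfVDiagonal := by
  intro grid _ _
  unfold Spec_lenOfVDiagonal
  exact main_eq grid
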